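-- pv_equiv track=rewrite | github.com/M-Mealey/projectEuler | 1to100/004.py | largest_palindrome_x
-- ===== SOURCE A (Python) =====
-- def is_palindrome(x):
--     is_pal = True
--     num_str = str(x)
--     current_digit = 1
--     while is_pal and current_digit <= len(num_str)//2:
--         if num_str[current_digit-1] != num_str[-current_digit]:
--             is_pal = False
--         current_digit += 1
--     return is_pal
--
-- def largest_palindrome_x(x):
--     palindrome_found = False
--     largest_pal = 0
--     other_factor = x
--     while not palindrome_found and other_factor >= 100:
--         product = x * other_factor
--         if is_palindrome(product):
--             largest_pal = product
--             palindrome_found = True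
--         other_factor -= 1
--     return largest_pal
-- ===== SOURCE B (Python) =====
-- def largest_palindrome_x(x):
--     # Largest palindromic product = product of the largest qualifying factor,
--     # since products grow with the factor; so take the max over the whole range.
--     return max((x * f for f in range(100, x + 1)
--                 if str(x * f) == str(x * f)[::-1]), default=0)
-- ===== Notes on version B (the rewrite author's own statement) =====
-- stated objective: idiomatic
-- what changed: A scans factors downward with a hand-rolled half-compare palindrome loop and returns the first hit; B takes max(..., default=0) over the whole ascending factor range with str(p)==str(p)[::-1], relying on the product being monotone in the factor.
import Mathlib
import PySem

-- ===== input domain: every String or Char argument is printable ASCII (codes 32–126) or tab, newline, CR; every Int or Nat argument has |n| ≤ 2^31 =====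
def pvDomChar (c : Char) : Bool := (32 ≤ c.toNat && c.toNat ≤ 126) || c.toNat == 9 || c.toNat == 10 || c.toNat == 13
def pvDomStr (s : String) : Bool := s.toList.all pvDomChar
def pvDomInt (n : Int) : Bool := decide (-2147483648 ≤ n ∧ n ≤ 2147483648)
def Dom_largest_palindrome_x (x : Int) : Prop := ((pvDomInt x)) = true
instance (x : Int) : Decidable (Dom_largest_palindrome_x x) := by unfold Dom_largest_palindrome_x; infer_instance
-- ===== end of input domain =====

-- B replaces A's downward first-match factor scan (with a hand-rolled half-compare palindrome
-- test) by an idiomatic max-with-default over the whole factor range using str(p)==str(p)[::-1];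
-- the largest palindromic product is the product of the largest qualifying factor.

-- ===== PORT A =====
-- is_palindrome's while loop: current_digit counts up while the flag stays True.
-- The indexings num_str[current_digit-1] and num_str[-current_digit] are always in range
-- while current_digit ≤ len//2, so comparing the pyGet? Options is exact there.
def pvPalLoopA (s : List Char) (d : Nat) : Bool :=
  if d ≤ s.length / 2 then
    if PySem.List.pyGet? s ((d : Int) - 1) ≠ PySem.List.pyGet? s (-(d : Int)) then false
    else pvPalLoopA s (d + 1)
  else true
termination_by s.length / 2 + 1 - d

def pvIsPalindromeA (x : Int) : Bool := pvPalLoopA (PySem.Int.toChars x) 1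

-- largest_palindrome_x's while loop: other_factor goes down from x until 99 or a palindrome.
def pvLoopA (x f : Int) : Int :=
  if 100 ≤ f then
    if pvIsPalindromeA (x * f) then x * f else pvLoopA x (f - 1)
  else 0
termination_by (f - 99).toNat
decreasing_by omega

def largest_palindrome_x (x : Int) : Int := pvLoopA x x

-- ===== PORT B =====
-- str(p) == str(p)[::-1]
def pvIsPalB (p : Int) : Bool :=
  decide (PySem.List.slice? (PySem.Int.toChars p) none none (-1)
          = some (PySem.Int.toChars p))

-- max((x*f for f in range(100, x+1) if <palindrome test>), default=0)
def largest_palindrome_x_alt (x : Int) : Int :=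
  PySem.List.maxD (((PySem.List.pyRange 100 (x + 1)).map (fun f => x * f)).filter pvIsPalB)
    (fun v => v) 0

-- ===== PRECONDITION & SPEC =====
def Spec_largest_palindrome_x (x : Int) (out : Int) : Prop := out = largest_palindrome_x_alt x
instance (x : Int) (out : Int) : Decidable (Spec_largest_palindrome_x x out) := by unfold Spec_largest_palindrome_x; infer_instance

-- ===== CLAIM (what is proved, stated in full; the proofs are below) =====
def Claim_equal_largest_palindrome_x : Prop := ∀ (x : Int), Dom_largest_palindrome_x x → Spec_largest_palindrome_x x (largest_palindrome_x x)

-- ===== LEMMAS AND PROOFS =====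

-- in-range indexing facts for the palindrome loop
lemma pvGet_pos (s : List Char) (d : Nat) (h1 : 1 ≤ d) (hd : d ≤ s.length / 2) :
    PySem.List.pyGet? s ((d : Int) - 1) = s[d - 1]? := by
  have h2 : d ≤ s.length := by omega
  simp [PySem.List.pyGet?, PySem.List.pyIdx?, h1, h2]

lemma pvGet_neg (s : List Char) (d : Nat) (h1 : 1 ≤ d) (hd : d ≤ s.length / 2) :
    PySem.List.pyGet? s (-(d : Int)) = s[s.length - d]? := by
  have h0 : ¬ d = 0 := by omega
  have h2 : d ≤ s.length := by omega
  simp [PySem.List.pyGet?, PySem.List.pyIdx?, h0, h2]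

-- the half scan checks exactly the pairs (i, n-1-i) for d-1 ≤ i < n/2
lemma pvPalLoopA_char (s : List Char) (d : Nat) (h1 : 1 ≤ d) :
    pvPalLoopA s d =
      decide (∀ i : Nat, d - 1 ≤ i → i < s.length / 2 → s[i]? = s[s.length - 1 - i]?) := by
  induction d using pvPalLoopA.induct (s := s) with
  | case1 d hd hne =>
    rw [pvPalLoopA, if_pos hd, if_pos hne]
    symm
    simp only [decide_eq_false_iff_not]
    intro hall
    apply hne
    rw [pvGet_pos s d h1 hd, pvGet_neg s d h1 hd]
    have := hall (d - 1) (le_refl _) (by omega)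
    rw [this]
    congr 1
    omega
  | case2 d hd hne ih =>
    rw [pvPalLoopA, if_pos hd, if_neg hne]
    rw [ih (by omega)]
    simp only [decide_eq_decide]
    constructor
    · intro hall i hi1 hi2
      by_cases hi : i = d - 1
      · subst hi
        have heq := not_ne_iff.mp hne
        rw [pvGet_pos s d h1 hd, pvGet_neg s d h1 hd] at heq
        rw [heq]; congr 1; omega
      · exact hall i (by omega) hi2
    · intro hall i hi1 hi2
      exact hall i (by omega) hi2
  | case3 d hd =>
    rw [pvPalLoopA, if_neg hd]
    symm
    simp only [decide_eq_true_eq]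
    intro i hi1 hi2
    omega

-- checking the first half against the mirrored position is exactly "s equals its reverse"
lemma pvHalf_iff_reverse (s : List Char) :
    (∀ i : Nat, i < s.length / 2 → s[i]? = s[s.length - 1 - i]?) ↔ s.reverse = s := by
  constructor
  · intro hall
    apply List.ext_getElem?
    intro i
    by_cases hi : i < s.length
    · rw [List.getElem?_reverse hi]
      by_cases hc : i < s.length / 2
      · exact (hall i hc).symm
      · by_cases hm : s.length - 1 - i < s.length / 2
        · have := hall (s.length - 1 - i) hm
          rw [this]
          congr 1
          omega
        · have : s.length - 1 - i = i := by omega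
          rw [this]
    · rw [List.getElem?_eq_none (by simpa using (by omega : s.length ≤ i)),
          List.getElem?_eq_none (by omega)]
  · intro hrev i hi
    have hlen : i < s.length := by omega
    conv_lhs => rw [← hrev]
    rw [List.getElem?_reverse hlen]

-- A's half-compare loop and B's reverse comparison decide the same predicate
lemma pvPal_agree (p : Int) : pvIsPalindromeA p = pvIsPalB p := by
  unfold pvIsPalindromeA pvIsPalB
  rw [pvPalLoopA_char _ 1 (le_refl _), PySem.List.slice?_none_none_neg_one]
  simp only [Option.some.injEq, decide_eq_decide]
  rw [← pvHalf_iff_reverse]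
  constructor
  · intro h i hi; exact h i (by omega) hi
  · intro h i _ hi; exact h i hi

-- Python's max keeps the first maximum; an element strictly above everything before it wins
lemma pvMax?_aux {α : Type} (l : List α) (v : α) (key : α → Int) (acc : Option α)
    (h : ∀ y ∈ l, key y < key v)
    (hacc : acc = none ∨ ∃ m, acc = some m ∧ key m < key v) :
    List.foldl (fun acc x => match acc with
      | none => some x
      | some m => if key m < key x then some x else some m) acc (l ++ [v]) = some v := by
  induction l generalizing acc with
  | nil =>
    rcases hacc with h0 | ⟨m, hm, hlt⟩
    · simp [h0]
    · simp [hm, hlt]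
  | cons a t ih =>
    simp only [List.cons_append, List.foldl_cons]
    apply ih
    · intro y hy; exact h y (List.mem_cons_of_mem _ hy)
    · have ha : key a < key v := h a List.mem_cons_self
      rcases hacc with h0 | ⟨m, hm, hlt⟩
      · subst h0; right; exact ⟨a, rfl, ha⟩
      · subst hm
        right
        dsimp only
        split_ifs with hlt2
        · exact ⟨a, rfl, ha⟩
        · exact ⟨m, rfl, hlt⟩

lemma pvMax?_append_singleton {α : Type} (l : List α) (v : α) (key : α → Int)
    (h : ∀ y ∈ l, key y < key v) : PySem.List.max? (l ++ [v]) key = some v := by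
  unfold PySem.List.max?
  exact pvMax?_aux l v key none h (Or.inl rfl)

lemma pvRange_snoc (f : Int) (hf : 100 ≤ f) :
    PySem.List.pyRange 100 (f + 1) = PySem.List.pyRange 100 f ++ [f] := by
  rw [PySem.List.pyRange_one_append 100 f (f + 1) hf (by omega)]
  congr 1
  rw [PySem.List.pyRange_one_cons (by omega : f < f + 1),
      PySem.List.pyRange_one_eq_nil (le_refl (f + 1))]

-- A's downward first-match loop computes the max over the factor range, for positive x
lemma pvLoopA_char (x : Int) (hx : 0 < x) (f : Int) :
    pvLoopA x f =
      PySem.List.maxD (((PySem.List.pyRange 100 (f + 1)).map (fun g => x * g)).filter pvIsPalB)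
        (fun v => v) 0 := by
  induction f using pvLoopA.induct (x := x) with
  | case1 f hf hpal =>
    rw [pvLoopA, if_pos hf, if_pos hpal]
    rw [pvRange_snoc f hf]
    rw [List.map_append, List.filter_append]
    have hb : pvIsPalB (x * f) = true := by rw [← pvPal_agree]; exact hpal
    simp [hb]
    unfold PySem.List.maxD
    rw [pvMax?_append_singleton _ _ _ ?_]
    · rfl
    · intro y hy
      simp only [List.mem_filter, List.mem_map] at hy
      obtain ⟨⟨g, hg, rfl⟩, _⟩ := hy
      have := (PySem.List.mem_pyRange_one).mp hg
      exact mul_lt_mul_of_pos_left (by omega) hx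
  | case2 f hf hpal ih =>
    rw [pvLoopA, if_pos hf, if_neg hpal]
    rw [ih, pvRange_snoc f hf]
    have hb : pvIsPalB (x * f) = false := by rw [← pvPal_agree]; simpa using hpal
    simp [hb]
  | case3 f hf =>
    rw [pvLoopA, if_neg hf]
    rw [PySem.List.pyRange_one_eq_nil (by omega)]
    rfl

-- ===== VERDICT (by name: the statement is the Claim_ definition above) =====
theorem largest_palindrome_x_spec : Claim_equal_largest_palindrome_x := by
  intro x _
  unfold Spec_largest_palindrome_x largest_palindrome_x largest_palindrome_x_alt
  by_cases hx : 100 ≤ x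
  · rw [pvLoopA_char x (by omega) x]
  · rw [pvLoopA, if_neg hx, PySem.List.pyRange_one_eq_nil (by omega)]
    rfl
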